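-- pv_equiv track=rewrite | github.com/krishnaLikesToCode/personal-coding-projects | RunLengthEncoderPython/RunLengthEncoderPython.py | dRLE
-- ===== SOURCE A (Python) =====
-- def dRLE(FILECONTENT):
--     NUMBERS=['1','2','3','4','5','6','7','8','9','0']
--     DECODED = [[] for i in range(len(FILECONTENT))]
--
--     for i in range(len(FILECONTENT)):
--         NUMBEROF =[]
--         for j in range(len(FILECONTENT[i])):
--             if FILECONTENT[i][j] in NUMBERS:
--                 NUMBEROF.append(FILECONTENT[i][j])
--             else:
--                 CLETTER=FILECONTENT[i][j]
--                 AMM=int("".join(NUMBEROF))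
--                 for k in range(AMM):
--                     DECODED[i].append(CLETTER)
--                 NUMBEROF=[]
--
--     return DECODED
-- ===== SOURCE B (Python) =====
-- def dRLE(FILECONTENT):
--     DECODED = []
--     for line in FILECONTENT:
--         i, n = 0, len(line)
--         row = []
--         while i < n:
--             j = i
--             while j < n and '0' <= line[j] <= '9':
--                 j += 1
--             if j == n:
--                 break  # trailing digits with no following char are ignored
--             row += [line[j]] * int(line[i:j])
--             i = j + 1
--         DECODED.append(row)
--     return DECODED
-- ===== Notes on version B (the rewrite author's own statement) =====
-- stated objective: alternative
-- what changed: B tokenizes each line into (digit-run, following-char) pairs by scanning runs with index arithmetic and builds the row by list replication [ch]*int(count), replacing A's per-character state machine that accumulates digit characters and appends the letter one at a time in an inner loop.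
import Mathlib
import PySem

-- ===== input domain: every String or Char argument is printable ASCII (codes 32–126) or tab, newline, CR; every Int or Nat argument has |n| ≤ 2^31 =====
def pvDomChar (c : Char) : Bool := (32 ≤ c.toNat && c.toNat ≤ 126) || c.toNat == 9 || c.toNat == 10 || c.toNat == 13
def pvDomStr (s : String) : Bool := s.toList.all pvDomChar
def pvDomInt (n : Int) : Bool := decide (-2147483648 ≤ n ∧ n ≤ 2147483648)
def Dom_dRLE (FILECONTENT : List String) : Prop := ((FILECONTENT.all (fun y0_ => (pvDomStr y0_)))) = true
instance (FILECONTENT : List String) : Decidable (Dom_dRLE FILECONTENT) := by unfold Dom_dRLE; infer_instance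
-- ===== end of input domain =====

-- B tokenizes each line into (digit-run, char) pairs and expands by replication, instead of A's
-- per-character state machine with an inner append loop; objective: alternative decomposition.

-- ===== PORT A =====
def dRLE_numbers : List Char := ['1','2','3','4','5','6','7','8','9','0']

-- inner j-loop of A over the characters of one line, carrying NUMBEROF and DECODED[i];
-- int("".join(NUMBEROF)) raises on "" in Python (excluded by Pre_); .getD 0 only totalizes.
def dRLE_line : List Char → List Char → List String → List String
  | [], _, dec => dec
  | c :: rest, numberof, dec =>
    if c ∈ dRLE_numbers then
      dRLE_line rest (numberof ++ [c]) dec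
    else
      dRLE_line rest []
        ((PySem.List.pyRange 0 ((PySem.Int.ofStr? (String.mk numberof)).getD 0) 1).foldl
          (fun d _ => d ++ [String.mk [c]]) dec)

def dRLE (FILECONTENT : List String) : List (List String) :=
  FILECONTENT.map (fun s => dRLE_line s.toList [] [])

-- ===== PORT B =====
def dRLE_isDig (c : Char) : Bool := '0' ≤ c && c ≤ '9'

-- the while-loop of B: cut the line into (digit-run, following char) pairs; a trailing
-- digit-run with no following char is dropped (the `break`)
def dRLE_tok : List Char → List (List Char × Char)
  | [] => []
  | c :: rest =>
    match h : (c :: rest).dropWhile dRLE_isDig with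
    | [] => []
    | ch :: tl => ((c :: rest).takeWhile dRLE_isDig, ch) :: dRLE_tok tl
  termination_by l => l.length
  decreasing_by
    have h1 : ((c :: rest).dropWhile dRLE_isDig).length ≤ (c :: rest).length :=
      List.length_dropWhile_le _ _
    rw [h] at h1
    simp at h1 ⊢
    omega

-- row += [ch] * int(cnt); int("") raises in Python (excluded by Pre_), .getD 0 only totalizes
def dRLE_expand (ps : List (List Char × Char)) : List String :=
  ps.flatMap (fun p =>
    PySem.List.pyRepeat [String.mk [p.2]] ((PySem.Int.ofStr? (String.mk p.1)).getD 0))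

def dRLE_alt (FILECONTENT : List String) : List (List String) :=
  FILECONTENT.map (fun s => dRLE_expand (dRLE_tok s.toList))

-- ===== PRECONDITION & SPEC =====
-- adjacent-pair check: no non-digit character directly follows a non-digit character
def dRLE_pairsOK : List Char → Bool
  | a :: b :: t => (dRLE_isDig a || dRLE_isDig b) && dRLE_pairsOK (b :: t)
  | _ => true

-- a line is accepted iff it is empty, or starts with a digit and has no two adjacent
-- non-digits: exactly the lines where every non-digit is preceded by a digit, i.e. where
-- A's int("".join(NUMBEROF)) (and B's int(line[i:j])) never sees the empty string.
def dRLE_lineOK : List Char → Bool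
  | [] => true
  | c :: rest => dRLE_isDig c && dRLE_pairsOK (c :: rest)

-- Pre_ excludes exactly the inputs where both Pythons raise ValueError (int('')):
-- some line has a non-digit character not immediately preceded by a digit.
def Pre_dRLE (FILECONTENT : List String) : Prop :=
  ∀ s ∈ FILECONTENT, dRLE_lineOK s.toList = true
instance (FILECONTENT : List String) : Decidable (Pre_dRLE FILECONTENT) := by
  unfold Pre_dRLE; infer_instance

def pvWitness_dRLE : List String := ["3a2b10c4", "", "12"]

def Spec_dRLE (FILECONTENT : List String) (out : List (List String)) : Prop := out = dRLE_alt FILECONTENT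
instance (FILECONTENT : List String) (out : List (List String)) : Decidable (Spec_dRLE FILECONTENT out) := by unfold Spec_dRLE; infer_instance

-- ===== CLAIM (what is proved, stated in full; the proofs are below) =====
def Claim_equal_dRLE : Prop := ∀ (FILECONTENT : List String), Dom_dRLE FILECONTENT → Pre_dRLE FILECONTENT → Spec_dRLE FILECONTENT (dRLE FILECONTENT)

-- ===== LEMMAS AND PROOFS =====

lemma dRLE_mem_numbers_iff (c : Char) : (c ∈ dRLE_numbers) ↔ dRLE_isDig c = true := by
  constructor
  · intro h; fin_cases h <;> decide
  · intro h
    simp only [dRLE_isDig, Bool.and_eq_true, decide_eq_true_eq, Char.le_def] at h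
    obtain ⟨h1, h2⟩ := h
    have hn1 : 48 ≤ c.toNat := h1
    have hn2 : c.toNat ≤ 57 := h2
    have hofn : c = Char.ofNat c.toNat := by rw [Char.ofNat_toNat]
    interval_cases hc : c.toNat <;> simp_all [dRLE_numbers]

lemma dRLE_takeWhile_all_append (acc : List Char) (c : Char) (rest : List Char)
    (hacc : ∀ a ∈ acc, dRLE_isDig a = true) (hc : dRLE_isDig c = false) :
    (acc ++ c :: rest).takeWhile dRLE_isDig = acc ∧
    (acc ++ c :: rest).dropWhile dRLE_isDig = c :: rest := by
  induction acc with
  | nil => simp [List.takeWhile_cons, List.dropWhile_cons, hc]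
  | cons a as ih =>
    have ha : dRLE_isDig a = true := hacc a (by simp)
    have := ih (fun x hx => hacc x (by simp [hx]))
    simp [List.takeWhile_cons, List.dropWhile_cons, ha, this]

lemma dRLE_tok_all_dig (acc : List Char) (hacc : ∀ a ∈ acc, dRLE_isDig a = true) :
    dRLE_tok acc = [] := by
  cases acc with
  | nil => rw [dRLE_tok]
  | cons a as =>
    rw [dRLE_tok]
    have : (a :: as).dropWhile dRLE_isDig = [] := by
      rw [List.dropWhile_eq_nil_iff]; exact hacc
    split
    · rfl
    · rename_i ch tl h; rw [this] at h; cases h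

lemma dRLE_tok_eq (acc : List Char) (c : Char) (rest : List Char)
    (hacc : ∀ a ∈ acc, dRLE_isDig a = true) (hc : dRLE_isDig c = false) :
    dRLE_tok (acc ++ c :: rest) = (acc, c) :: dRLE_tok rest := by
  obtain ⟨ht, hd⟩ := dRLE_takeWhile_all_append acc c rest hacc hc
  cases hl : acc ++ c :: rest with
  | nil => exact absurd hl (by simp)
  | cons x xs =>
    rw [dRLE_tok]
    rw [← hl, hd, ht]

lemma dRLE_foldl_append (x : String) (n : Int) (dec : List String) :
    (PySem.List.pyRange 0 n 1).foldl (fun d _ => d ++ [x]) dec =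
      dec ++ PySem.List.pyRepeat [x] n := by
  rw [PySem.List.pyRepeat_singleton]
  have key : ∀ (l : List Int) (d : List String),
      l.foldl (fun d _ => d ++ [x]) d = d ++ List.replicate l.length x := by
    intro l
    induction l with
    | nil => simp
    | cons a t ih => intro d; rw [List.foldl_cons, ih]; simp [List.replicate_succ]
  rw [key]
  congr 1
  rw [PySem.List.length_pyRange_one]
  congr 1
  omega

lemma dRLE_line_eq (rest acc : List Char) (dec : List String)
    (hacc : ∀ a ∈ acc, dRLE_isDig a = true) :
    dRLE_line rest acc dec = dec ++ dRLE_expand (dRLE_tok (acc ++ rest)) := by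
  induction rest generalizing acc dec with
  | nil =>
    rw [dRLE_line]
    rw [List.append_nil, dRLE_tok_all_dig acc hacc]
    simp [dRLE_expand]
  | cons c rest ih =>
    rw [dRLE_line]
    by_cases hc : c ∈ dRLE_numbers
    · rw [if_pos hc]
      have hcd : dRLE_isDig c = true := (dRLE_mem_numbers_iff c).mp hc
      rw [ih (acc ++ [c]) dec (by intro a ha; rcases List.mem_append.mp ha with h | h
                                  · exact hacc a h
                                  · simp at h; subst h; exact hcd)]
      simp
    · rw [if_neg hc]
      have hcd : dRLE_isDig c = false := by
        by_contra h
        exact hc ((dRLE_mem_numbers_iff c).mpr (by simpa using h))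
      rw [ih [] _ (by simp)]
      rw [dRLE_tok_eq acc c rest hacc hcd]
      rw [dRLE_foldl_append]
      simp [dRLE_expand]

-- ===== VERDICT (by name: the statement is the Claim_ definition above) =====
theorem dRLE_spec : Claim_equal_dRLE := by
  intro FILECONTENT _ _
  unfold Spec_dRLE dRLE dRLE_alt
  apply List.map_congr_left
  intro s _
  exact dRLE_line_eq s.toList [] [] (by simp)
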